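-- pv_equiv track=rewrite | github.com/shhuan1989/algorithms | leetcode/easy/compare-strings-by-frequency-of-the-smallest-character.py | numSmallerByFrequency
-- ===== SOURCE A (Python) =====
-- from typing import List
--
-- def numSmallerByFrequency(queries: List[str], words: List[str]) -> List[int]:
--     def f(word):
--         w, c = 'z', 0
--         for u in word:
--             if u == w:
--                 c += 1
--             elif u < w:
--                 w = u
--                 c = 1
--         return c
--
--     memo = [0] * 12
--     for w in words:
--         memo[f(w)] += 1
--
--     for i in range(10, -1, -1):
--         memo[i] += memo[i+1]
--
--     return [memo[f(q)+1] for q in queries]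
-- ===== SOURCE B (Python) =====
-- from typing import List
--
-- def numSmallerByFrequency(queries: List[str], words: List[str]) -> List[int]:
--     def f(word):
--         w, c = 'z', 0
--         for u in word:
--             if u == w:
--                 c += 1
--             elif u < w:
--                 w = u
--                 c = 1
--         return c
--
--     fs = [f(w) for w in words]
--     res = []
--     for q in queries:
--         fq = f(q)
--         res.append(sum(1 for v in fs if v > fq))
--     return res
-- ===== Notes on version B (the rewrite author's own statement) =====
-- stated objective: simpler
-- what changed: Replaces the size-12 frequency bucket plus in-place suffix-sum table (with its implicit f<=11 bound) with a plain list of f-values and a direct strictly-greater count per query.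
import Mathlib
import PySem

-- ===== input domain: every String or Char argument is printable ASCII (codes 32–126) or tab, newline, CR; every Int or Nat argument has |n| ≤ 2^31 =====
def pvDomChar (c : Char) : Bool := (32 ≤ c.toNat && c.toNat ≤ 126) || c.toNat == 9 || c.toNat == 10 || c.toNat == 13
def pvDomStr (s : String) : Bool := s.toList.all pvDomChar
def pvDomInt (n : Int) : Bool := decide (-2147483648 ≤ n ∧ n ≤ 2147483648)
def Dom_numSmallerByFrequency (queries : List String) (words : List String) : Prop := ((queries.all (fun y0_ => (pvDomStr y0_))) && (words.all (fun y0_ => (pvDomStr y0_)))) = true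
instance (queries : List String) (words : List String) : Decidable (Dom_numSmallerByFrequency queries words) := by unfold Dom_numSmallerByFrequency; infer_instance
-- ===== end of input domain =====

-- B replaces A's size-12 frequency bucket and in-place suffix-sum table with a plain
-- list of f-values and a direct strictly-greater count per query (simpler, not faster).

-- ===== PORT A =====
-- the inner helper f(word) shared by both ports (B keeps it verbatim): a fold over the
-- characters with state (w, c)
def pyFStep (s : Char × Int) (u : Char) : Char × Int :=
  if u = s.1 then (s.1, s.2 + 1) else if u < s.1 then (u, 1) else s

def pyF (word : String) : Int := (word.toList.foldl pyFStep ('z', 0)).2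

-- Python A raises IndexError when f(w) ≥ 12 or f(q) ≥ 11 (memo has 12 slots); those
-- inputs are excluded by Pre_ below.  f ≥ 0 always, so .toNat on it is exact, and the
-- out-of-range no-op of List.modify / default of List.getD only fire outside Pre_.
def numSmallerByFrequency (queries : List String) (words : List String) : List Int :=
  let memo0 : List Int := List.replicate 12 0
  let memo1 := words.foldl (fun m w => m.modify (pyF w).toNat (· + 1)) memo0
  let memo2 := (PySem.List.pyRange 10 (-1) (-1)).foldl
    (fun m i => m.set i.toNat (m.getD i.toNat 0 + m.getD (i.toNat + 1) 0)) memo1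
  queries.map (fun q => memo2.getD ((pyF q).toNat + 1) 0)

-- ===== PORT B =====
-- fs = [f(w) for w in words]; per query: sum(1 for v in fs if v > fq)
def numSmallerByFrequency_alt (queries : List String) (words : List String) : List Int :=
  let fs := words.map pyF
  queries.map (fun q =>
    let fq := pyF q
    fs.foldl (fun acc v => if fq < v then acc + 1 else acc) 0)

-- ===== PRECONDITION & SPEC =====
-- frequency of the smallest character of w that is ≤ 'z' ('z' is A's sentinel; 0 for "")
def pvFreqMin (w : String) : Nat := w.toList.count (w.toList.foldl min 'z')

-- Pre_ excludes exactly the inputs on which Python A raises IndexError: some word whose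
-- smallest-character frequency is ≥ 12, or some query whose smallest-character frequency is ≥ 11.
def Pre_numSmallerByFrequency (queries : List String) (words : List String) : Prop :=
  (∀ w ∈ words, pvFreqMin w ≤ 11) ∧ (∀ q ∈ queries, pvFreqMin q ≤ 10)
instance (queries : List String) (words : List String) : Decidable (Pre_numSmallerByFrequency queries words) := by unfold Pre_numSmallerByFrequency; infer_instance

def pvWitness_numSmallerByFrequency : List String × List String := (["ab", "zz"], ["aab", ""])

def Spec_numSmallerByFrequency (queries : List String) (words : List String) (out : List Int) : Prop := out = numSmallerByFrequency_alt queries words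
instance (queries : List String) (words : List String) (out : List Int) : Decidable (Spec_numSmallerByFrequency queries words out) := by unfold Spec_numSmallerByFrequency; infer_instance

-- ===== CLAIM (what is proved, stated in full; the proofs are below) =====
def Claim_equal_numSmallerByFrequency : Prop := ∀ (queries : List String) (words : List String), Dom_numSmallerByFrequency queries words → Pre_numSmallerByFrequency queries words → Spec_numSmallerByFrequency queries words (numSmallerByFrequency queries words)

-- ===== LEMMAS AND PROOFS =====

-- folding min never increases the accumulator
lemma foldl_min_le (p : List Char) : ∀ m : Char, p.foldl min m ≤ m := by
  induction p with
  | nil => intro m; simp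
  | cons u p ih => intro m; exact le_trans (ih _) (min_le_left _ _)

-- invariant of the inner loop: the state is (running min, count of that min)
lemma foldl_pyFStep (p : List Char) : ∀ (m : Char) (c : Int),
    p.foldl pyFStep (m, c) =
      (p.foldl min m,
        if p.foldl min m = m then c + p.count m else (p.count (p.foldl min m) : Int)) := by
  induction p with
  | nil => intro m c; simp
  | cons u p ih =>
    intro m c
    simp only [List.foldl_cons, pyFStep]
    rcases lt_trichotomy u m with hu | hu | hu
    · -- u < m : state becomes (u, 1), min m u = u
      rw [if_neg (by exact fun h => absurd h (ne_of_lt hu)), if_pos hu]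
      rw [ih u 1]
      have hmin : min m u = u := min_eq_right hu.le
      rw [hmin]
      have hle : p.foldl min u ≤ u := foldl_min_le p u
      have hne : p.foldl min u ≠ m := fun h => absurd (h ▸ hle) (not_le.mpr hu)
      rw [if_neg hne]
      by_cases h2 : p.foldl min u = u
      · rw [if_pos h2, h2, List.count_cons, if_pos (by simp)]
        simp only [Prod.mk.injEq, true_and]; push_cast; omega
      · rw [if_neg h2, List.count_cons, if_neg (by simp; exact fun h => h2 h.symm)]
        simp
    · -- u = m : count up
      subst hu
      rw [if_pos rfl, ih u (c + 1), min_self]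
      by_cases h2 : p.foldl min u = u
      · rw [if_pos h2, if_pos h2, List.count_cons, if_pos (by simp)]
        simp only [Prod.mk.injEq, true_and]; push_cast; omega
      · rw [if_neg h2, if_neg h2, List.count_cons, if_neg (by simp; exact fun h => h2 h.symm)]
        simp
    · -- m < u : unchanged
      rw [if_neg (by exact fun h => absurd h (ne_of_gt hu)), if_neg (by exact not_lt.mpr hu.le),
        ih m c, min_eq_left hu.le]
      have hle : p.foldl min m ≤ m := foldl_min_le p m
      by_cases h2 : p.foldl min m = m
      · rw [if_pos h2, if_pos h2, List.count_cons, if_neg (by simp; exact fun h => absurd (h ▸ hu) (lt_irrefl _))]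
        simp
      · rw [if_neg h2, if_neg h2, List.count_cons,
          if_neg (by simp; intro h; exact absurd ((h ▸ hle).trans_lt hu) (lt_irrefl _))]
        simp

lemma pyF_eq (w : String) : pyF w = (pvFreqMin w : Int) := by
  unfold pyF pvFreqMin
  rw [foldl_pyFStep]
  by_cases h : w.toList.foldl min 'z' = 'z'
  · rw [if_pos h, h]; simp
  · rw [if_neg h]

lemma pyF_toNat (w : String) : (pyF w).toNat = pvFreqMin w := by rw [pyF_eq]; simp

-- number of elements ≥ k
def cntGe (gs : List Nat) (k : Nat) : Nat := gs.countP (fun v => decide (k ≤ v))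

lemma cntGe_split (gs : List Nat) (k : Nat) : cntGe gs k = gs.count k + cntGe gs (k + 1) := by
  induction gs with
  | nil => simp [cntGe]
  | cons v gs ih =>
    simp only [cntGe, List.countP_cons, List.count_cons] at *
    split_ifs with h1 h2 h3 <;> simp_all <;> omega

lemma cntGe_last (gs : List Nat) (h : ∀ v ∈ gs, v ≤ 11) : cntGe gs 12 = 0 := by
  rw [cntGe, List.countP_eq_zero]
  intro v hv
  simpa using Nat.lt_succ_of_le (h v hv)

lemma getD_modify (m : List Int) (i j : Nat) (hj : j < m.length) :
    (m.modify j (· + 1)).getD i 0 = m.getD i 0 + if i = j then 1 else 0 := by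
  simp only [List.getD, List.getElem?_modify]
  by_cases hij : i = j
  · subst hij
    rw [if_pos rfl, List.getElem?_eq_getElem hj]
    simp
  · have : ¬ j = i := fun h => hij h.symm
    cases m[i]? <;> simp [this, hij]

lemma build_length (ws : List String) : ∀ (m : List Int),
    (ws.foldl (fun m w => m.modify (pyF w).toNat (· + 1)) m).length = m.length := by
  induction ws with
  | nil => intro m; rfl
  | cons w ws ih => intro m; rw [List.foldl_cons, ih, List.length_modify]

lemma build_getD (ws : List String) : ∀ (m : List Int) (i : Nat), i < m.length →
    (∀ w ∈ ws, (pyF w).toNat < m.length) →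
    (ws.foldl (fun m w => m.modify (pyF w).toNat (· + 1)) m).getD i 0 =
      m.getD i 0 + ((ws.map (fun w => (pyF w).toNat)).count i : Int) := by
  induction ws with
  | nil => intro m i _ _; simp
  | cons w ws ih =>
    intro m i hi hb
    rw [List.foldl_cons, ih _ i (by rwa [List.length_modify])
      (by intro x hx; rw [List.length_modify]; exact hb x (List.mem_cons_of_mem _ hx))]
    rw [getD_modify m i _ (hb w (List.mem_cons_self))]
    rw [List.map_cons, List.count_cons]
    split_ifs with h1 h2 h3 <;> simp_all <;> push_cast <;> omega

-- memo after the counting loop, as an explicit 12-element list of counts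
lemma build_explicit (ws : List String) (h : ∀ w ∈ ws, pvFreqMin w ≤ 11) :
    ws.foldl (fun m w => m.modify (pyF w).toNat (· + 1)) (List.replicate 12 0) =
      [((ws.map pvFreqMin).count 0 : Int), ((ws.map pvFreqMin).count 1 : Int),
       ((ws.map pvFreqMin).count 2 : Int), ((ws.map pvFreqMin).count 3 : Int),
       ((ws.map pvFreqMin).count 4 : Int), ((ws.map pvFreqMin).count 5 : Int),
       ((ws.map pvFreqMin).count 6 : Int), ((ws.map pvFreqMin).count 7 : Int),
       ((ws.map pvFreqMin).count 8 : Int), ((ws.map pvFreqMin).count 9 : Int),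
       ((ws.map pvFreqMin).count 10 : Int), ((ws.map pvFreqMin).count 11 : Int)] := by
  have hb : ∀ w ∈ ws, (pyF w).toNat < (List.replicate 12 (0:Int)).length := by
    intro w hw; rw [pyF_toNat]; simpa using Nat.lt_succ_of_le (h w hw)
  have hmap : ws.map (fun w => (pyF w).toNat) = ws.map pvFreqMin :=
    List.map_congr_left fun w _ => pyF_toNat w
  apply List.ext_getElem
  · rw [build_length]; rfl
  · intro i hi1 hi2
    rw [build_length] at hi1
    simp only [List.length_replicate] at hi1
    rw [← List.getD_eq_getElem _ 0, ← List.getD_eq_getElem _ 0,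
      build_getD ws _ i (by simpa using hi1) hb, hmap]
    interval_cases i <;> simp

-- the suffix-sum pass on an explicit 12-element list
lemma suffix_explicit (a0 a1 a2 a3 a4 a5 a6 a7 a8 a9 a10 a11 : Int) :
    (PySem.List.pyRange 10 (-1) (-1)).foldl
      (fun m i => m.set i.toNat (m.getD i.toNat 0 + m.getD (i.toNat + 1) 0))
      [a0, a1, a2, a3, a4, a5, a6, a7, a8, a9, a10, a11] =
      [a0+(a1+(a2+(a3+(a4+(a5+(a6+(a7+(a8+(a9+(a10+a11)))))))))),
       a1+(a2+(a3+(a4+(a5+(a6+(a7+(a8+(a9+(a10+a11))))))))),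
       a2+(a3+(a4+(a5+(a6+(a7+(a8+(a9+(a10+a11)))))))),
       a3+(a4+(a5+(a6+(a7+(a8+(a9+(a10+a11))))))),
       a4+(a5+(a6+(a7+(a8+(a9+(a10+a11)))))),
       a5+(a6+(a7+(a8+(a9+(a10+a11))))),
       a6+(a7+(a8+(a9+(a10+a11)))),
       a7+(a8+(a9+(a10+a11))),
       a8+(a9+(a10+a11)),
       a9+(a10+a11),
       a10+a11,
       a11] := by
  rw [show PySem.List.pyRange 10 (-1) (-1) = [10,9,8,7,6,5,4,3,2,1,0] from by decide]
  rfl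

-- A's table lookup at index f(q)+1 is the number of words with a strictly larger f-value
lemma memo2_getD (ws : List String) (h : ∀ w ∈ ws, pvFreqMin w ≤ 11) (k : Nat) (hk : k ≤ 10) :
    ((PySem.List.pyRange 10 (-1) (-1)).foldl
      (fun m i => m.set i.toNat (m.getD i.toNat 0 + m.getD (i.toNat + 1) 0))
      (ws.foldl (fun m w => m.modify (pyF w).toNat (· + 1)) (List.replicate 12 0))).getD (k+1) 0
    = (cntGe (ws.map pvFreqMin) (k+1) : Int) := by
  rw [build_explicit ws h, suffix_explicit]
  set gs := ws.map pvFreqMin with hgs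
  have hb : ∀ v ∈ gs, v ≤ 11 := by
    intro v hv; rw [hgs] at hv
    obtain ⟨w, hw, rfl⟩ := List.mem_map.mp hv
    exact h w hw
  have s12 := cntGe_last gs hb
  have s1 := cntGe_split gs 1
  have s2 := cntGe_split gs 2
  have s3 := cntGe_split gs 3
  have s4 := cntGe_split gs 4
  have s5 := cntGe_split gs 5
  have s6 := cntGe_split gs 6
  have s7 := cntGe_split gs 7
  have s8 := cntGe_split gs 8
  have s9 := cntGe_split gs 9
  have s10 := cntGe_split gs 10
  have s11 := cntGe_split gs 11
  interval_cases k <;>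
  · simp only [List.getD, List.getElem?_cons_zero, List.getElem?_cons_succ, Option.getD_some]
    try simp only [Nat.reduceAdd] at s1 s2 s3 s4 s5 s6 s7 s8 s9 s10 s11 ⊢
    omega

-- B's per-query fold is the same strictly-larger count
lemma alt_count_aux (ws : List String) (k : Nat) : ∀ (acc : Int),
    (ws.map pyF).foldl (fun acc v => if (k : Int) < v then acc + 1 else acc) acc
      = acc + (cntGe (ws.map pvFreqMin) (k+1) : Int) := by
  induction ws with
  | nil => intro acc; simp [cntGe]
  | cons w ws ih =>
    intro acc
    rw [List.map_cons, List.foldl_cons, pyF_eq w, ih]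
    simp only [List.map_cons, cntGe, List.countP_cons, decide_eq_true_eq]
    split_ifs with h1 h2 h3 <;> push_cast <;> omega

-- ===== VERDICT (by name: the statement is the Claim_ definition above) =====
theorem numSmallerByFrequency_spec : Claim_equal_numSmallerByFrequency := by
  intro queries words _ hpre
  obtain ⟨hw, hq⟩ := hpre
  unfold Spec_numSmallerByFrequency numSmallerByFrequency numSmallerByFrequency_alt
  apply List.map_congr_left
  intro q hqm
  rw [pyF_toNat q, memo2_getD words hw (pvFreqMin q) (hq q hqm), pyF_eq q]
  have := alt_count_aux words (pvFreqMin q) 0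
  simp only [zero_add] at this
  exact this.symm
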